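-- pv_equiv track=rewrite | github.com/Rus313/r38irth-PortSymphony | data/backend/query_handler.py | _format_bunching_data
-- ===== SOURCE A (Python) =====
-- from typing import Dict, List, Any
--
-- def _format_bunching_data(vessels: List[Dict]) -> str:
--     """Format vessel data for bunching analysis"""
--     lines = ["VESSEL ARRIVAL ANALYSIS:\n"]
--
--     # Group by berth and time window
--     from collections import defaultdict
--     berth_schedule = defaultdict(list)
--
--     for vessel in vessels:
--         berth = vessel.get('berth', 'Unknown')
--         berth_schedule[berth].append(vessel)
--
--     for berth, berth_vessels in berth_schedule.items():
--         lines.append(f"\nBERTH: {berth}")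
--         lines.append(f"Scheduled Arrivals: {len(berth_vessels)}")
--         for vessel in berth_vessels:
--             lines.append(
--                 f"  - {vessel.get('vessel_name')} | "
--                 f"ETA: {vessel.get('eta')} | "
--                 f"From: {vessel.get('from_port')}"
--             )
--
--     return "\n".join(lines)
-- ===== SOURCE B (Python) =====
-- def _format_bunching_data(vessels):
--     """Format vessel data for bunching analysis (peel-off-one-berth-group-at-a-time strategy)."""
--     out = "VESSEL ARRIVAL ANALYSIS:\n"
--     remaining = list(vessels)
--     while remaining:
--         berth = remaining[0].get('berth', 'Unknown')
--         group = [v for v in remaining if v.get('berth', 'Unknown') == berth]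
--         remaining = [v for v in remaining[1:] if v.get('berth', 'Unknown') != berth]
--         out += f"\n\nBERTH: {berth}\nScheduled Arrivals: {len(group)}"
--         for v in group:
--             out += (f"\n  - {v.get('vessel_name')} | "
--                     f"ETA: {v.get('eta')} | "
--                     f"From: {v.get('from_port')}")
--     return out
-- ===== Notes on version B (the rewrite author's own statement) =====
-- stated objective: alternative
-- what changed: Replaces the defaultdict group-then-iterate-items strategy by a worklist loop that repeatedly peels off the first remaining vessel's whole berth group (two filters per distinct berth) and builds the result by direct string concatenation instead of joining a list of lines.
import Mathlib
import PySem

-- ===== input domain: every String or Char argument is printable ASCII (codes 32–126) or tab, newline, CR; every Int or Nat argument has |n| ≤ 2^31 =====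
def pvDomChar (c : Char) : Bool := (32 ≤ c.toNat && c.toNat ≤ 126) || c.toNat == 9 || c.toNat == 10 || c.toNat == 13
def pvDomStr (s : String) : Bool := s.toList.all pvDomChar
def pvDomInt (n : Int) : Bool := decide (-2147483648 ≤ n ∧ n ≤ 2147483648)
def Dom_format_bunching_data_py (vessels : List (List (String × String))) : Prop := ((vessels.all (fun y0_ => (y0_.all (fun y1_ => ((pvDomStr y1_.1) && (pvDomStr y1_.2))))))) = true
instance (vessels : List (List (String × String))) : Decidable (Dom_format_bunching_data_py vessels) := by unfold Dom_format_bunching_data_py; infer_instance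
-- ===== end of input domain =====

-- B replaces A's group-into-a-dict-then-iterate-items strategy by a worklist loop peeling off one
-- whole berth group at a time, building the output by direct string concatenation; same output.

-- shared helpers: Python dict lookups
def pvBerthOf (v : List (String × String)) : String :=
  (PySem.Dict.ofList v).getD "berth" "Unknown"

def pvOptStr : Option String → String
  | some s => s
  | none => "None"

def pvVesselLine (v : List (String × String)) : String :=
  "  - " ++ pvOptStr ((PySem.Dict.ofList v).get? "vessel_name") ++ " | ETA: " ++
    pvOptStr ((PySem.Dict.ofList v).get? "eta") ++ " | From: " ++
    pvOptStr ((PySem.Dict.ofList v).get? "from_port")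

-- ===== PORT A =====
def format_bunching_data_py (vessels : List (List (String × String))) : String :=
  -- berth_schedule = defaultdict(list); for vessel in vessels: berth_schedule[berth].append(vessel)
  let sched : PySem.Dict String (List (List (String × String))) :=
    vessels.foldl (fun d v => d.modify (pvBerthOf v) [] (· ++ [v])) PySem.Dict.empty
  -- for berth, berth_vessels in berth_schedule.items(): …
  let lines : List String :=
    sched.items.foldl
      (fun acc p =>
        let acc := acc ++ ["\nBERTH: " ++ p.1]
        let acc := acc ++ ["Scheduled Arrivals: " ++ PySem.Int.toStr p.2.length]
        p.2.foldl (fun a v => a ++ [pvVesselLine v]) acc)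
      ["VESSEL ARRIVAL ANALYSIS:\n"]
  PySem.Str.join "\n" lines

-- ===== PORT B =====
-- the 'while remaining:' worklist loop of Source B, as recursion on the shrinking remaining list
def pvBlocks (remaining : List (List (String × String))) : String :=
  match remaining with
  | [] => ""
  | v :: rest =>
    let berth := pvBerthOf v
    let group := (v :: rest).filter (fun w => pvBerthOf w == berth)
    let block :=
      group.foldl (fun s w => s ++ "\n" ++ pvVesselLine w)
        ("\n\nBERTH: " ++ berth ++ "\nScheduled Arrivals: " ++ PySem.Int.toStr (group.length : Int))
    block ++ pvBlocks (rest.filter (fun w => !(pvBerthOf w == berth)))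
termination_by remaining.length
decreasing_by
  have h := List.length_filter_le (fun (w : {x // x ∈ rest}) => !(pvBerthOf w.1 == pvBerthOf v)) rest.attach
  simp at h ⊢
  omega

def format_bunching_data_py_alt (vessels : List (List (String × String))) : String :=
  "VESSEL ARRIVAL ANALYSIS:\n" ++ pvBlocks vessels

-- ===== PRECONDITION & SPEC =====
def Spec_format_bunching_data_py (vessels : List (List (String × String))) (out : String) : Prop := out = format_bunching_data_py_alt vessels
instance (vessels : List (List (String × String))) (out : String) : Decidable (Spec_format_bunching_data_py vessels out) := by unfold Spec_format_bunching_data_py; infer_instance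

-- ===== CLAIM (what is proved, stated in full; the proofs are below) =====
def Claim_equal_format_bunching_data_py : Prop := ∀ (vessels : List (List (String × String))), Dom_format_bunching_data_py vessels → Spec_format_bunching_data_py vessels (format_bunching_data_py vessels)

-- ===== LEMMAS AND PROOFS =====

-- proof-side abbreviations: first-seen berth order, per-berth group, the lines of one block
def pvOrder (vs : List (List (String × String))) : PySem.Set String :=
  vs.foldl (fun s v => PySem.Set.add s (pvBerthOf v)) []

def pvGrp (vs : List (List (String × String))) (b : String) : List (List (String × String)) :=
  vs.filter (fun v => pvBerthOf v == b)

def pvBlockLines (b : String) (grp : List (List (String × String))) : List String :=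
  ("\nBERTH: " ++ b) :: ("Scheduled Arrivals: " ++ PySem.Int.toStr (grp.length : Int)) ::
    grp.map pvVesselLine

-- A's grouping dict read at key b is the filtered group
lemma sched_getD (vessels : List (List (String × String))) (b : String) :
    (vessels.foldl (fun d v => d.modify (pvBerthOf v) [] (· ++ [v]))
        (PySem.Dict.empty : PySem.Dict String (List (List (String × String))))).getD b []
      = pvGrp vessels b := by
  rw [show vessels.foldl (fun d v => d.modify (pvBerthOf v) [] (· ++ [v]))
        (PySem.Dict.empty : PySem.Dict String (List (List (String × String))))
      = (vessels.map (fun v => (pvBerthOf v, v))).foldl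
          (fun d p => d.modify p.1 [] (· ++ [p.2])) PySem.Dict.empty from by rw [List.foldl_map]]
  rw [PySem.Dict.getD_foldl_modify_append, PySem.Dict.getD_empty, List.filter_map]
  simp [pvGrp, Function.comp_def]

-- A's grouping dict keys are the first-seen berth order
lemma sched_keys (vessels : List (List (String × String))) :
    (vessels.foldl (fun d v => d.modify (pvBerthOf v) [] (· ++ [v]))
        (PySem.Dict.empty : PySem.Dict String (List (List (String × String))))).keys
      = pvOrder vessels := by
  rw [PySem.Dict.keys_foldl_modify_key, PySem.Dict.keys_empty,
    PySem.Set.update_map_eq_foldl_add]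
  rfl

lemma sched_items (vessels : List (List (String × String))) :
    (vessels.foldl (fun d v => d.modify (pvBerthOf v) [] (· ++ [v]))
        (PySem.Dict.empty : PySem.Dict String (List (List (String × String))))).items
      = (pvOrder vessels).map (fun b => (b, pvGrp vessels b)) := by
  rw [PySem.Dict.items_eq_map_keys _
    (PySem.Dict.nodup_keys_foldl_modify_key _ _ _ _ _ PySem.Dict.nodup_keys_empty) [],
    sched_keys]
  exact List.map_congr_left (fun b _ => by rw [sched_getD])

-- A as a join over the per-berth block lines
lemma A_as_join (vessels : List (List (String × String))) :
    format_bunching_data_py vessels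
      = PySem.Str.join "\n" ("VESSEL ARRIVAL ANALYSIS:\n" ::
          (pvOrder vessels).flatMap (fun b => pvBlockLines b (pvGrp vessels b))) := by
  unfold format_bunching_data_py
  simp only []
  rw [sched_items, List.foldl_map]
  simp only [PySem.List.foldl_append_singleton_eq_map]
  rw [show (fun (acc : List String) b =>
        acc ++ ["\nBERTH: " ++ b] ++ ["Scheduled Arrivals: " ++ PySem.Int.toStr ((pvGrp vessels b).length : Int)]
          ++ (pvGrp vessels b).map pvVesselLine)
      = (fun acc b => acc ++ pvBlockLines b (pvGrp vessels b)) from by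
    funext acc b; simp [pvBlockLines]]
  rw [PySem.List.foldl_append_eq_flatMap]
  rfl

-- "\n".join(h :: L), at the character level
lemma join_toList (h : String) (L : List String) :
    (PySem.Str.join "\n" (h :: L)).toList = h.toList ++ L.flatMap (fun s => '\n' :: s.toList) := by
  induction L generalizing h with
  | nil => simp [PySem.Str.join, PySem.Chars.join_singleton]
  | cons l r ih =>
    have := ih l
    simp [PySem.Str.join, PySem.Chars.join_cons_cons] at this ⊢
    simp [this]

-- B's inner for-loop at the character level
lemma blockfold_toList (grp : List (List (String × String))) (s : String) :
    (grp.foldl (fun s w => s ++ "\n" ++ pvVesselLine w) s).toList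
      = s.toList ++ grp.flatMap (fun w => '\n' :: (pvVesselLine w).toList) := by
  induction grp generalizing s with
  | nil => simp
  | cons w r ih => simp [ih]

-- membership in the first-seen order is membership among the berths
lemma mem_pvOrder {vs : List (List (String × String))} {b : String} (h : b ∈ pvOrder vs) :
    b ∈ vs.map pvBerthOf := by
  have : pvOrder vs = PySem.Set.ofList (vs.map pvBerthOf) := by
    rw [PySem.Set.ofList_eq_foldl, List.foldl_map]; rfl
  rw [this] at h
  exact (PySem.Set.mem_ofList _ _).mp h

-- adding a key already present is a no-op (used for the first-seen order recursion)
lemma foldl_add_skip (l : List (List (String × String))) (s : PySem.Set String) (b : String)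
    (hb : b ∈ s) :
    l.foldl (fun s v => PySem.Set.add s (pvBerthOf v)) s
      = (l.filter (fun v => !(pvBerthOf v == b))).foldl
          (fun s v => PySem.Set.add s (pvBerthOf v)) s := by
  induction l generalizing s with
  | nil => rfl
  | cons v r ih =>
    by_cases hv : pvBerthOf v = b
    · have hadd : PySem.Set.add s (pvBerthOf v) = s := by
        simp [PySem.Set.add, PySem.Set.contains, hv, hb]
      rw [List.foldl_cons, hadd, List.filter_cons]
      simp only [hv, beq_self_eq_true, Bool.not_true, Bool.false_eq_true, if_false]
      exact ih s hb
    · rw [List.foldl_cons, List.filter_cons]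
      simp only [show (pvBerthOf v == b) = false from by simp [hv], Bool.not_false, if_true,
        List.foldl_cons]
      exact ih _ (by simp [PySem.Set.add]; split <;> simp [hb])

-- a head element never re-added commutes out of the fold
lemma foldl_add_cons (l : List (List (String × String))) (s : PySem.Set String) (b : String)
    (hnb : ∀ v ∈ l, pvBerthOf v ≠ b) (hbs : b ∉ s) :
    l.foldl (fun s v => PySem.Set.add s (pvBerthOf v)) (b :: s)
      = b :: l.foldl (fun s v => PySem.Set.add s (pvBerthOf v)) s := by
  induction l generalizing s with
  | nil => rfl
  | cons v r ih =>
    have hv : pvBerthOf v ≠ b := hnb v (List.mem_cons_self ..)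
    have : PySem.Set.add (b :: s) (pvBerthOf v) = b :: PySem.Set.add s (pvBerthOf v) := by
      simp [PySem.Set.add, PySem.Set.contains, hv]
      split <;> simp
    rw [List.foldl_cons, this, List.foldl_cons]
    by_cases hmem : pvBerthOf v ∈ s
    · have : PySem.Set.add s (pvBerthOf v) = s := by simp [PySem.Set.add, PySem.Set.contains, hmem]
      rw [this]
      exact ih s (fun w hw => hnb w (List.mem_cons_of_mem _ hw)) hbs
    · exact ih _ (fun w hw => hnb w (List.mem_cons_of_mem _ hw))
        (by simp [PySem.Set.add, PySem.Set.contains, hmem, hbs, Ne.symm hv])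

-- first-seen order of (v :: rest): v's berth, then the order of the rest with that berth removed
lemma pvOrder_cons (v : List (String × String)) (rest : List (List (String × String))) :
    pvOrder (v :: rest)
      = pvBerthOf v :: pvOrder (rest.filter (fun w => !(pvBerthOf w == pvBerthOf v))) := by
  unfold pvOrder
  rw [List.foldl_cons]
  have h1 : PySem.Set.add ([] : PySem.Set String) (pvBerthOf v) = [pvBerthOf v] := rfl
  rw [h1, foldl_add_skip rest [pvBerthOf v] (pvBerthOf v) (by simp)]
  exact foldl_add_cons _ [] (pvBerthOf v)
    (fun w hw => by
      have := List.of_mem_filter hw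
      simpa using this)
    (by simp)

-- B's worklist recursion produces exactly the flattened "\n"-prefixed block lines
lemma blocks_spec (n : Nat) : ∀ (vs : List (List (String × String))), vs.length ≤ n →
    (pvBlocks vs).toList
      = ((pvOrder vs).flatMap (fun b => pvBlockLines b (pvGrp vs b))).flatMap
          (fun s => '\n' :: s.toList) := by
  induction n with
  | zero =>
    intro vs h
    have : vs = [] := List.length_eq_zero_iff.mp (Nat.le_zero.mp h)
    subst this
    rw [pvBlocks]
    simp [pvOrder]
  | succ n ih =>
    intro vs h
    match vs with
    | [] =>
      rw [pvBlocks]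
      simp [pvOrder]
    | v :: rest =>
      rw [pvBlocks]
      set b := pvBerthOf v with hb
      set rem := rest.filter (fun w => !(pvBerthOf w == b)) with hrem
      have hrlen : rem.length ≤ n := by
        have hf := List.length_filter_le (fun w => !(pvBerthOf w == b)) rest
        rw [← hrem] at hf
        simp at h
        omega
      have hIH := ih rem hrlen
      -- the head group
      have hgrp : (v :: rest).filter (fun w => pvBerthOf w == b) = pvGrp (v :: rest) b := rfl
      -- groups for later berths are untouched by peeling off b's group
      have hlater : ∀ b' ∈ pvOrder rem, pvGrp rem b' = pvGrp (v :: rest) b' := by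
        intro b' hb'
        obtain ⟨w, hwmem, hweq⟩ := List.mem_map.mp (mem_pvOrder hb')
        have hwne : pvBerthOf w ≠ b := by
          have := List.of_mem_filter hwmem
          simpa using this
        have hb'b : b' ≠ b := by rw [← hweq]; exact hwne
        unfold pvGrp
        rw [hrem, List.filter_filter, List.filter_cons]
        simp only [show (pvBerthOf v == b') = false from by
          rw [← hb]; simp; exact fun hc => hb'b hc.symm, Bool.false_eq_true, if_false]
        exact List.filter_congr (fun w _ => by
          by_cases hw : pvBerthOf w = b'
          · simp [hw, hb'b]
          · simp [hw])
      rw [pvOrder_cons, ← hb, ← hrem]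
      simp only [List.flatMap_cons, List.flatMap_append, String.toList_append,
        blockfold_toList, hgrp]
      rw [hIH,
        List.flatMap_congr (fun b' hb' => congrArg (pvBlockLines b') (hlater b' hb'))]
      simp [pvBlockLines, List.flatMap_cons, String.toList_append, List.flatMap_map]

-- ===== VERDICT (by name: the statement is the Claim_ definition above) =====
theorem format_bunching_data_py_spec : Claim_equal_format_bunching_data_py := by
  intro vessels _
  unfold Spec_format_bunching_data_py format_bunching_data_py_alt
  rw [A_as_join]
  apply String.toList_inj.mp
  rw [join_toList, String.toList_append, blocks_spec vessels.length vessels (Nat.le_refl _)]
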